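-- pv_equiv track=rewrite | github.com/dodinovembri/alternate_hungarian_algorithm | code/all_places - russel - last.py | find_minimum_array
-- ===== SOURCE A (Python) =====
-- def find_minimum_array(receive_fuzzy_val_transpose):
--     minimum_array = []
--     for first_min_array in receive_fuzzy_val_transpose:
--         minimum_value = min([i for i in first_min_array if i != 0])
--         key_minimum = first_min_array.index(minimum_value)
--         data = [minimum_value, key_minimum]
--         minimum_array.append(data)
--     return minimum_array
-- ===== SOURCE B (Python) =====
-- def find_minimum_array(receive_fuzzy_val_transpose):
--     minimum_array = []
--     for row in receive_fuzzy_val_transpose: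
--         best_val = None
--         best_idx = -1
--         for i, v in enumerate(row):
--             if v != 0 and (best_val is None or v < best_val):
--                 best_val = v
--                 best_idx = i
--         if best_val is None:
--             raise ValueError("no nonzero value in row")
--         minimum_array.append([best_val, best_idx])
--     return minimum_array
-- ===== Notes on version B (the rewrite author's own statement) =====
-- stated objective: alternative
-- what changed: Replaces A's three passes per row (build a filtered list, min() over it, then list.index over the original row) with one explicit single pass that tracks the best nonzero value and its index with strict <.
import Mathlib
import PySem

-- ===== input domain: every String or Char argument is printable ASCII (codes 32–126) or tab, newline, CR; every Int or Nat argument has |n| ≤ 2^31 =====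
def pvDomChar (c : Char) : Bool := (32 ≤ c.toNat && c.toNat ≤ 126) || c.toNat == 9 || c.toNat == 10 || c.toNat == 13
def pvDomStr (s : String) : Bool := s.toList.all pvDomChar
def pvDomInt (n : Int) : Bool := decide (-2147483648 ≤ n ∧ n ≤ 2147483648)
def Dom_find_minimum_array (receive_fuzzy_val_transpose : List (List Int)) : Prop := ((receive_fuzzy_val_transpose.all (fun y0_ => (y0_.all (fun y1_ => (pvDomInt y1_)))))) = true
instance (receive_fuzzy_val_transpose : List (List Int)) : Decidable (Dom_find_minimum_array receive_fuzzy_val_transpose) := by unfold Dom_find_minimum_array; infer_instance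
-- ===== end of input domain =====

-- B replaces A's three passes per row (filtered list, min(), list.index) by one explicit
-- scan tracking the best nonzero value and its index (strict <); same return value.

-- ===== PORT A =====
def find_minimum_array (receive_fuzzy_val_transpose : List (List Int)) : List (List Int) :=
  receive_fuzzy_val_transpose.foldl (fun minimum_array first_min_array =>
    match PySem.List.min? (first_min_array.filter (fun i => i != 0)) (fun x => x) with
    | none => minimum_array  -- Python: min([]) raises ValueError; excluded by Pre_
    | some minimum_value =>
      match PySem.List.index? first_min_array minimum_value with
      | none => minimum_array  -- unreachable: minimum_value ∈ first_min_array
      | some key_minimum => minimum_array ++ [[minimum_value, (key_minimum : Int)]]) []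

-- ===== PORT B =====
-- B's inner loop: scan (value at running index i), keep the best nonzero seen so far.
def pvBestNonzero : List Int → Int → Option (Int × Int) → Option (Int × Int)
  | [], _, best => best
  | v :: rest, i, best =>
      pvBestNonzero rest (i + 1)
        (if (v != 0) && (match best with | none => true | some p => decide (v < p.1))
         then some (v, i) else best)

def find_minimum_array_alt (receive_fuzzy_val_transpose : List (List Int)) : List (List Int) :=
  receive_fuzzy_val_transpose.foldl (fun minimum_array row =>
    match pvBestNonzero row 0 none with
    | none => minimum_array  -- B raises ValueError; excluded by Pre_
    | some (best_val, best_idx) => minimum_array ++ [[best_val, best_idx]]) []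

-- ===== PRECONDITION & SPEC =====
-- Pre_ excludes inputs containing an all-zero (or empty) row: there Python A raises
-- ValueError (min of an empty sequence) and B raises ValueError too.
def Pre_find_minimum_array (receive_fuzzy_val_transpose : List (List Int)) : Prop :=
  ∀ row ∈ receive_fuzzy_val_transpose, ∃ v ∈ row, v ≠ 0
instance (receive_fuzzy_val_transpose : List (List Int)) : Decidable (Pre_find_minimum_array receive_fuzzy_val_transpose) := by unfold Pre_find_minimum_array; infer_instance

def pvWitness_find_minimum_array : List (List Int) := [[0, 3, 1, 1], [2, -1]]

def Spec_find_minimum_array (receive_fuzzy_val_transpose : List (List Int)) (out : List (List Int)) : Prop := out = find_minimum_array_alt receive_fuzzy_val_transpose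
instance (receive_fuzzy_val_transpose : List (List Int)) (out : List (List Int)) : Decidable (Spec_find_minimum_array receive_fuzzy_val_transpose out) := by unfold Spec_find_minimum_array; infer_instance

-- ===== CLAIM (what is proved, stated in full; the proofs are below) =====
def Claim_equal_find_minimum_array : Prop := ∀ (receive_fuzzy_val_transpose : List (List Int)), Dom_find_minimum_array receive_fuzzy_val_transpose → Pre_find_minimum_array receive_fuzzy_val_transpose → Spec_find_minimum_array receive_fuzzy_val_transpose (find_minimum_array receive_fuzzy_val_transpose)

-- ===== LEMMAS AND PROOFS =====

-- folding min over a list commutes with an extra outer min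
lemma pv_foldl_min_min (x a : Int) (t : List Int) :
    t.foldl min (min x a) = min x (t.foldl min a) := by
  induction t generalizing a with
  | nil => rfl
  | cons b t ih =>
      simp only [List.foldl_cons, min_assoc]
      exact ih (min a b)

-- Python min of a cons, expressed via min of the tail
lemma pv_min?_id_cons' (x : Int) (l : List Int) :
    PySem.List.min? (x :: l) (fun y => y) =
      some (match PySem.List.min? l (fun y => y) with | none => x | some m => min x m) := by
  cases l with
  | nil => simp [PySem.List.min?]
  | cons a t =>
      rw [PySem.List.min?_id_cons, PySem.List.min?_id_cons]
      simp only [List.foldl_cons, Option.some.injEq]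
      exact pv_foldl_min_min x a t

-- running a scan from an existing best merges with the scan from nothing
lemma pv_merge (row : List Int) (i bv bi : Int) :
    pvBestNonzero row i (some (bv, bi)) =
      match pvBestNonzero row i none with
      | none => some (bv, bi)
      | some (v, j) => if v < bv then some (v, j) else some (bv, bi) := by
  induction row generalizing i bv bi with
  | nil => simp [pvBestNonzero]
  | cons v rest ih =>
      by_cases hv : v = 0
      · simp only [pvBestNonzero]
        simp [hv, ih]
      · have e1 : pvBestNonzero (v :: rest) i (some (bv, bi))
            = pvBestNonzero rest (i + 1) (if v < bv then some (v, i) else some (bv, bi)) := by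
          by_cases hlt : v < bv <;> simp [pvBestNonzero, hv, hlt]
        have e2 : pvBestNonzero (v :: rest) i none
            = pvBestNonzero rest (i + 1) (some (v, i)) := by
          simp [pvBestNonzero, hv]
        rw [e1, e2, ih]
        by_cases hlt : v < bv
        · simp only [hlt, if_true]
          rw [ih]
          rcases h : pvBestNonzero rest (i + 1) none with _ | ⟨w, j⟩
          · simp [hlt]
          · by_cases hwv : w < v
            · have hwb : w < bv := lt_trans hwv hlt
              simp [hwv, hwb]
            · simp [hwv, hlt]
        · simp only [hlt, if_false]
          rw [ih]
          rcases h : pvBestNonzero rest (i + 1) none with _ | ⟨w, j⟩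
          · simp [hlt]
          · by_cases hwv : w < v
            · simp [hwv]
            · have h1 : ¬ w < bv := fun hc => hlt (lt_of_le_of_lt (not_lt.mp hwv) hc)
              simp [hwv, h1, hlt]

-- the scan from nothing computes min-of-nonzeros and its first index
lemma pv_key (row : List Int) (i : Int) :
    pvBestNonzero row i none =
      (PySem.List.min? (row.filter (fun x => x != 0)) (fun y => y)).bind
        (fun m => (PySem.List.index? row m).map (fun (k : Nat) => (m, i + (k : Int)))) := by
  induction row generalizing i with
  | nil => simp [pvBestNonzero, PySem.List.min?]
  | cons v rest ih =>
      by_cases hv : v = 0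
      · -- zero head: skipped by both sides
        have hstep : pvBestNonzero (v :: rest) i none = pvBestNonzero rest (i + 1) none := by
          simp [pvBestNonzero, hv]
        have hf : (v :: rest).filter (fun x => x != 0) = rest.filter (fun x => x != 0) := by
          simp [hv]
        rw [hstep, ih, hf]
        rcases h : PySem.List.min? (rest.filter (fun x => x != 0)) (fun y => y) with _ | m
        · simp
        · have hm : m ≠ 0 := by
            have := List.of_mem_filter (PySem.List.min?_mem (key := fun y => y) h)
            simpa using this
          have hcons : PySem.List.index? (v :: rest) m
              = (PySem.List.index? rest m).map (· + 1) := by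
            apply PySem.List.index?_cons_of_ne; omega
          simp only [Option.bind, hcons, Option.map_map]
          rcases PySem.List.index? rest m with _ | k
          · rfl
          · simp only [Option.map_some, Function.comp_apply, Prod.mk.injEq, true_and,
              Option.some.injEq]
            push_cast; ring
      · -- nonzero head: it becomes the initial best
        have hstep : pvBestNonzero (v :: rest) i none
            = pvBestNonzero rest (i + 1) (some (v, i)) := by
          simp [pvBestNonzero, hv]
        have hf : (v :: rest).filter (fun x => x != 0) = v :: rest.filter (fun x => x != 0) := by
          simp [hv]
        rw [hstep, pv_merge, ih, hf, pv_min?_id_cons']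
        rcases h : PySem.List.min? (rest.filter (fun x => x != 0)) (fun y => y) with _ | m
        · -- no nonzero in the tail: the head is the answer
          simp only [Option.bind]
          rw [PySem.List.index?_cons_self]
          simp
        · have hmem : m ∈ rest :=
            List.mem_of_mem_filter (PySem.List.min?_mem (key := fun y => y) h)
          rcases hidx : PySem.List.index? rest m with _ | k
          · exact absurd hmem ((PySem.List.index?_eq_none_iff _ _).mp hidx)
          · by_cases hlt : m < v
            · have hcons : PySem.List.index? (v :: rest) m
                  = (PySem.List.index? rest m).map (· + 1) := by
                apply PySem.List.index?_cons_of_ne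
                exact (ne_of_lt hlt).symm
              simp only [min_eq_right hlt.le, Option.bind, hcons, hidx, Option.map_some,
                hlt, if_true, Prod.mk.injEq, true_and, Option.some.injEq]
              push_cast; ring
            · simp only [min_eq_left (not_lt.mp hlt), Option.bind, hidx, Option.map_some,
                hlt, if_false]
              rw [PySem.List.index?_cons_self]
              simp

-- per-row agreement of the two fold bodies, given a nonzero entry
lemma pv_row (row : List Int) (acc : List (List Int)) (h : ∃ v ∈ row, v ≠ 0) :
    (match PySem.List.min? (row.filter (fun i => i != 0)) (fun x => x) with
      | none => acc
      | some m =>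
        match PySem.List.index? row m with
        | none => acc
        | some k => acc ++ [[m, (k : Int)]])
    = (match pvBestNonzero row 0 none with
      | none => acc
      | some (best_val, best_idx) => acc ++ [[best_val, best_idx]]) := by
  rcases h with ⟨v, hv, hv0⟩
  have hvf : v ∈ row.filter (fun i => i != 0) := by
    simp [List.mem_filter, hv, hv0]
  rcases hmin : PySem.List.min? (row.filter (fun i => i != 0)) (fun x => x) with _ | m
  · rw [PySem.List.min?_eq_none_iff] at hmin
    rw [hmin] at hvf; cases hvf
  · have hmem : m ∈ row :=
      List.mem_of_mem_filter (PySem.List.min?_mem (key := fun x => x) hmin)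
    rcases hidx : PySem.List.index? row m with _ | k
    · exact absurd hmem ((PySem.List.index?_eq_none_iff _ _).mp hidx)
    · rw [pv_key, hmin]
      simp only [PySem.List.index?_eq_idxOf?] at hidx
      simp [hidx]

-- the two folds agree from any accumulator when every row has a nonzero entry
lemma pv_fold (t : List (List Int)) (h : ∀ row ∈ t, ∃ v ∈ row, v ≠ 0) :
    ∀ acc : List (List Int),
      t.foldl (fun minimum_array first_min_array =>
        match PySem.List.min? (first_min_array.filter (fun i => i != 0)) (fun x => x) with
        | none => minimum_array
        | some minimum_value =>
          match PySem.List.index? first_min_array minimum_value with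
          | none => minimum_array
          | some key_minimum => minimum_array ++ [[minimum_value, (key_minimum : Int)]]) acc
      = t.foldl (fun minimum_array row =>
        match pvBestNonzero row 0 none with
        | none => minimum_array
        | some (best_val, best_idx) => minimum_array ++ [[best_val, best_idx]]) acc := by
  induction t with
  | nil => intro acc; rfl
  | cons r rs ih =>
      intro acc
      simp only [List.foldl_cons]
      rw [pv_row r acc (h r (List.mem_cons_self ..))]
      exact ih (fun r' hr' => h r' (List.mem_cons_of_mem _ hr')) _

-- ===== VERDICT (by name: the statement is the Claim_ definition above) =====
theorem find_minimum_array_spec : Claim_equal_find_minimum_array := by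
  intro t _ hpre
  unfold Spec_find_minimum_array find_minimum_array find_minimum_array_alt
  exact pv_fold t hpre []
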